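-- pv_equiv track=rewrite | github.com/pypi-data/pypi-mirror-368 | packages/fn-cache/fn_cache-0.1.7-py3-none-any.whl/fn_cache/utils/cache_key.py | validate_cache_key
-- ===== SOURCE A (Python) =====
-- def validate_cache_key(key: str) -> bool:
--     """
--     验证缓存键是否有效
--
--     :param key: 缓存键
--     :return: 是否有效
--     """
--     if not key or not isinstance(key, str):
--         return False
--
--     # 检查长度
--     if len(key) > 250:
--         return False
--
--     # 检查是否包含无效字符
--     invalid_chars = ['\x00', '\x01', '\x02', '\x03', '\x04', '\x05', '\x06', '\x07',
--                      '\x08', '\x09', '\x0a', '\x0b', '\x0c', '\x0d', '\x0e', '\x0f',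
--                      '\x10', '\x11', '\x12', '\x13', '\x14', '\x15', '\x16', '\x17',
--                      '\x18', '\x19', '\x1a', '\x1b', '\x1c', '\x1d', '\x1e', '\x1f']
--
--     for char in invalid_chars:
--         if char in key:
--             return False
--
--     return True
-- ===== SOURCE B (Python) =====
-- def validate_cache_key(key: str) -> bool:
--     if not key or not isinstance(key, str):
--         return False
--     if len(key) > 250:
--         return False
--     return all(ord(c) >= 32 for c in key)
-- ===== Notes on version B (the rewrite author's own statement) =====
-- stated objective: simpler
-- what changed: Replaced the loop over 32 forbidden control characters (each doing a substring scan of the key) with a single pass over the key testing ord(c) >= 32, which covers exactly the listed code points 0x00-0x1f.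
import Mathlib
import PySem

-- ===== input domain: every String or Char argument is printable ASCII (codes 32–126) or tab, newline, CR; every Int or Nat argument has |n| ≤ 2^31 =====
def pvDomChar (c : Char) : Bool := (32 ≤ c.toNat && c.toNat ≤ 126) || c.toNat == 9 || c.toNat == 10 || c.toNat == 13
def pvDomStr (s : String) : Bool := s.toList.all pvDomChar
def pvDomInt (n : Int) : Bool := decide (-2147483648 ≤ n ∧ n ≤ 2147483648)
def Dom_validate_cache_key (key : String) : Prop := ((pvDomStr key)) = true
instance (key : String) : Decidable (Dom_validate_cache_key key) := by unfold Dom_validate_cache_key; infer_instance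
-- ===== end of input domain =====

-- ===== PORT A =====
-- A: empty-guard, length guard, then a loop over the 32 control-character strings testing substring containment.
def pvInvalidChars : List String :=
  [String.ofList [Char.ofNat 0], String.ofList [Char.ofNat 1], String.ofList [Char.ofNat 2], String.ofList [Char.ofNat 3], String.ofList [Char.ofNat 4], String.ofList [Char.ofNat 5], String.ofList [Char.ofNat 6], String.ofList [Char.ofNat 7], String.ofList [Char.ofNat 8], String.ofList [Char.ofNat 9], String.ofList [Char.ofNat 10], String.ofList [Char.ofNat 11], String.ofList [Char.ofNat 12], String.ofList [Char.ofNat 13], String.ofList [Char.ofNat 14], String.ofList [Char.ofNat 15], String.ofList [Char.ofNat 16], String.ofList [Char.ofNat 17], String.ofList [Char.ofNat 18], String.ofList [Char.ofNat 19], String.ofList [Char.ofNat 20], String.ofList [Char.ofNat 21], String.ofList [Char.ofNat 22], String.ofList [Char.ofNat 23], String.ofList [Char.ofNat 24], String.ofList [Char.ofNat 25], String.ofList [Char.ofNat 26], String.ofList [Char.ofNat 27], String.ofList [Char.ofNat 28], String.ofList [Char.ofNat 29], String.ofList [Char.ofNat 30], String.ofList [Char.ofNat 31]]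

def validate_cache_key (key : String) : Bool :=
  if key = "" then false
  else if PySem.Str.len key > 250 then false
  else if pvInvalidChars.any (fun c => PySem.Str.isIn c key) then false
  else true

-- ===== PORT B =====
-- B: same two guards, then ONE pass over the key's characters testing ord(c) >= 32.
def validate_cache_key_alt (key : String) : Bool :=
  if key = "" then false
  else if PySem.Str.len key > 250 then false
  else key.toList.all (fun c => 32 <= c.toNat)

-- ===== PRECONDITION & SPEC =====
def Spec_validate_cache_key (key : String) (out : Bool) : Prop := out = validate_cache_key_alt key
instance (key : String) (out : Bool) : Decidable (Spec_validate_cache_key key out) := by unfold Spec_validate_cache_key; infer_instance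

-- ===== CLAIM (what is proved, stated in full; the proofs are below) =====
def Claim_equal_validate_cache_key : Prop := ∀ (key : String), Dom_validate_cache_key key → Spec_validate_cache_key key (validate_cache_key key)

-- ===== LEMMAS AND PROOFS =====

lemma pvInvalidChars_eq :
    pvInvalidChars = (List.range 32).map (fun n => String.ofList [Char.ofNat n]) := by
  decide

lemma pvToNat_ofNat (n : Nat) (h : n < 32) : (Char.ofNat n).toNat = n := by
  have hv : n.isValidChar := Or.inl (by omega)
  simp [Char.ofNat, hv]

lemma pvInvalid_mem (c : Char) (h : c.toNat < 32) : String.ofList [c] ∈ pvInvalidChars := by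
  rw [pvInvalidChars_eq]
  exact List.mem_map.mpr ⟨c.toNat, List.mem_range.mpr h, by rw [Char.ofNat_toNat]⟩

lemma pvSingleton_infix {c : Char} {l : List Char} : [c] <:+: l ↔ c ∈ l := by
  constructor
  · intro h; exact h.sublist.mem (by simp)
  · intro h
    obtain ⟨s, t, rfl⟩ := List.mem_iff_append.mp h
    exact ⟨s, t, by simp⟩

lemma pvAny_eq (key : String) :
    pvInvalidChars.any (fun c => PySem.Str.isIn c key)
      = key.toList.any (fun c => decide (c.toNat < 32)) := by
  by_cases h : key.toList.any (fun c => decide (c.toNat < 32)) = true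
  · rw [h]
    obtain ⟨c, hc, hlt⟩ := List.any_eq_true.mp h
    refine List.any_eq_true.mpr ⟨String.ofList [c], pvInvalid_mem c (by simpa using hlt), ?_⟩
    rw [PySem.Str.isIn_iff_infix]
    simpa using pvSingleton_infix.mpr hc
  · have hge : ∀ c ∈ key.toList, 32 ≤ c.toNat := by
      intro c hc
      by_contra hlt
      exact h (List.any_eq_true.mpr ⟨c, hc, by simpa using Nat.lt_of_not_le hlt⟩)
    rw [Bool.eq_false_iff.mpr h]
    refine List.any_eq_false.mpr ?_
    intro s hs hin
    rw [PySem.Str.isIn_iff_infix] at hin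
    rw [pvInvalidChars_eq] at hs
    obtain ⟨n, hn, rfl⟩ := List.mem_map.mp hs
    have hn32 : n < 32 := List.mem_range.mp hn
    have hmem : Char.ofNat n ∈ key.toList := pvSingleton_infix.mp (by simpa using hin)
    have := hge _ hmem
    rw [pvToNat_ofNat n hn32] at this
    omega

lemma pvAnyAll (l : List Char) :
    l.any (fun c => decide (c.toNat < 32)) = !l.all (fun c => decide (32 ≤ c.toNat)) := by
  induction l with
  | nil => simp
  | cons a l ih =>
    have ha : (decide (a.toNat < 32)) = !decide (32 ≤ a.toNat) := by
      by_cases h : a.toNat < 32 <;> simp [h] <;> omega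
    simp only [List.any_cons, List.all_cons, ih, Bool.not_and, ha]

-- ===== VERDICT (by name: the statement is the Claim_ definition above) =====
theorem validate_cache_key_spec : Claim_equal_validate_cache_key := by
  intro key _
  unfold Spec_validate_cache_key validate_cache_key validate_cache_key_alt
  by_cases h0 : key = ""
  · simp [h0]
  · rw [if_neg h0, if_neg h0]
    by_cases h1 : PySem.Str.len key > 250
    · rw [if_pos h1, if_pos h1]
    · rw [if_neg h1, if_neg h1, pvAny_eq, pvAnyAll]
      cases key.toList.all (fun c => decide (32 ≤ c.toNat)) <;> simp
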